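-- pv_equiv track=rewrite | github.com/IntelLabs/GraVi-T | gravit/utils/eval_tool.py | get_class_start_end_times
-- ===== SOURCE A (Python) =====
-- def get_class_start_end_times(result):
--     """
--     Return the classes and their corresponding start and end times
--     """
--     last_class = result[0]
--     classes = [last_class]
--     starts = [0]
--     ends = []
--
--     for i, c in enumerate(result):
--         if c != last_class:
--             classes.append(c)
--             starts.append(i)
--             ends.append(i)
--             last_class = c
--
--     ends.append(len(result)-1)
--
--     return classes, starts, ends
-- ===== SOURCE B (Python) =====
-- def get_class_start_end_times(result):
--     """
--     Return the classes and their corresponding start and end times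
--     """
--     # Pass 1: run-length encode the sequence (maintain [class, length] runs).
--     runs = []
--     for x in result:
--         if runs and runs[-1][0] == x:
--             runs[-1][1] += 1
--         else:
--             runs.append([x, 1])
--     # Pass 2: the classes are the run labels.
--     classes = [k for k, _ in runs]
--     # Pass 3: the starts are the prefix sums of the run lengths.
--     starts = []
--     total = 0
--     for _, n in runs:
--         starts.append(total)
--         total += n
--     # ends follow A's overlap convention: end of run k = start of run k+1,
--     # and the final end is len(result) - 1.
--     ends = starts[1:] + [len(result) - 1]
--     return classes, starts, ends
-- ===== Notes on version B (the rewrite author's own statement) =====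
-- stated objective: alternative
-- what changed: Replaces A's single stateful boundary-emitting loop (last_class comparison appending indices to three lists) with a run-length encoding of the sequence followed by separate projection/prefix-sum passes that derive classes, starts (accumulated run lengths) and ends arithmetically.
import Mathlib
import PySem

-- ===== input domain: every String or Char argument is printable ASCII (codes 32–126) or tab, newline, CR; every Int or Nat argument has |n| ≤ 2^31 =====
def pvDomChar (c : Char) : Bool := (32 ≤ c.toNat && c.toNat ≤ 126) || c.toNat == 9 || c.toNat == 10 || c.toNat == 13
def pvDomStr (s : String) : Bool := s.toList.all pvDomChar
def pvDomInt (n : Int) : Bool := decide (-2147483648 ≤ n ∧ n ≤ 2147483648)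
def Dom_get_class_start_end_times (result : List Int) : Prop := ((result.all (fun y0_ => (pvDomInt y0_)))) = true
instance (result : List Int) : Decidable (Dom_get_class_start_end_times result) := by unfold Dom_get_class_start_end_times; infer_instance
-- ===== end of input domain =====

-- B replaces A's boundary-emitting loop with a run-length encoding pass followed by
-- projection and prefix-sum passes; objective: alternative decomposition (same O(n) cost).

-- ===== PORT A =====
-- loop body of A's for-loop (state: last_class, classes, starts, ends)
def pvStepA (s : Int × List Int × List Int × List Int) (ic : Int × Int) :
    Int × List Int × List Int × List Int :=
  if ic.2 ≠ s.1 then (ic.2, s.2.1 ++ [ic.2], s.2.2.1 ++ [ic.1], s.2.2.2 ++ [ic.1]) else s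

def get_class_start_end_times (result : List Int) : List Int × List Int × List Int :=
  match PySem.List.pyGet? result 0 with
  | none => ([], [], [])   -- result[0] raises IndexError; excluded by Pre_
  | some last_class =>
    let st := (PySem.List.enumerate result 0).foldl pvStepA
      (last_class, [last_class], [0], [])
    (st.2.1, st.2.2.1, st.2.2.2 ++ [(result.length : Int) - 1])

-- ===== PORT B =====
-- pass 1 loop body: extend the last run or open a new one ('runs[-1][1] += 1' becomes
-- replacing the last pair, the immutable transliteration of the in-place increment)
def pvStepRuns (runs : List (Int × Int)) (x : Int) : List (Int × Int) :=
  match runs.getLast? with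
  | some kn => if kn.1 == x then runs.dropLast ++ [(kn.1, kn.2 + 1)] else runs ++ [(x, 1)]
  | none => [(x, 1)]

-- pass 3 loop body: state = (starts so far, running total)
def pvStepStarts (p : List Int × Int) (kn : Int × Int) : List Int × Int :=
  (p.1 ++ [p.2], p.2 + kn.2)

def get_class_start_end_times_alt (result : List Int) : List Int × List Int × List Int :=
  let runs := result.foldl pvStepRuns []
  let classes := runs.map Prod.fst
  let starts := (runs.foldl pvStepStarts ([], 0)).1
  let ends := PySem.List.slice starts (some 1) none ++ [(result.length : Int) - 1]
  (classes, starts, ends)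

-- ===== PRECONDITION & SPEC =====
-- Pre_ excludes the empty list, on which A raises IndexError (result[0]).
def Pre_get_class_start_end_times (result : List Int) : Prop := result ≠ []
instance (result : List Int) : Decidable (Pre_get_class_start_end_times result) := by unfold Pre_get_class_start_end_times; infer_instance
def pvWitness_get_class_start_end_times : List Int := [1, 1, 2]

def Spec_get_class_start_end_times (result : List Int) (out : List Int × List Int × List Int) : Prop := out = get_class_start_end_times_alt result
instance (result : List Int) (out : List Int × List Int × List Int) : Decidable (Spec_get_class_start_end_times result out) := by unfold Spec_get_class_start_end_times; infer_instance

-- ===== CLAIM (what is proved, stated in full; the proofs are below) =====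
def Claim_equal_get_class_start_end_times : Prop := ∀ (result : List Int), Dom_get_class_start_end_times result → Pre_get_class_start_end_times result → Spec_get_class_start_end_times result (get_class_start_end_times result)

-- ===== LEMMAS AND PROOFS =====

-- boundary (index, class) pairs of the tail t, given previous element prev and next index k
def pvChg (prev k : Int) : List Int → List (Int × Int)
  | [] => []
  | c :: t => if c ≠ prev then (k, c) :: pvChg c (k + 1) t else pvChg c (k + 1) t

-- runs of (current run of class prev, length n so far) ++ t
def pvRunsAux (prev n : Int) : List Int → List (Int × Int)
  | [] => [(prev, n)]
  | c :: t => if c = prev then pvRunsAux prev (n + 1) t else (prev, n) :: pvRunsAux c 1 t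

-- the start positions of the runs, the first one starting at s
def pvScanStarts (s : Int) : List (Int × Int) → List Int
  | [] => []
  | kn :: r => s :: pvScanStarts (s + kn.2) r

theorem pvFoldA_eq (t : List Int) : ∀ (prev k : Int) (cs ss es : List Int),
    (PySem.List.enumerate t k).foldl pvStepA (prev, cs, ss, es) =
      (t.getLastD prev,
       cs ++ (pvChg prev k t).map Prod.snd,
       ss ++ (pvChg prev k t).map Prod.fst,
       es ++ (pvChg prev k t).map Prod.fst) := by
  induction t with
  | nil => intro prev k cs ss es; simp [PySem.List.enumerate_nil, pvChg]
  | cons c t ih =>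
    intro prev k cs ss es
    rw [PySem.List.enumerate_cons, List.foldl_cons]
    by_cases h : c = prev
    · rw [show pvStepA (prev, cs, ss, es) (k, c) = (prev, cs, ss, es) by simp [pvStepA, h]]
      rw [ih prev (k + 1) cs ss es]
      subst h
      simp [pvChg]
      cases t <;> simp
    · rw [show pvStepA (prev, cs, ss, es) (k, c)
            = (c, cs ++ [c], ss ++ [k], es ++ [k]) by simp [pvStepA, h]]
      rw [ih c (k + 1) (cs ++ [c]) (ss ++ [k]) (es ++ [k])]
      refine Prod.ext ?_ (by simp [pvChg, h])
      simp only [List.getLastD_cons]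

theorem pvFoldRuns_eq (t : List Int) : ∀ (rs : List (Int × Int)) (prev n : Int),
    t.foldl pvStepRuns (rs ++ [(prev, n)]) = rs ++ pvRunsAux prev n t := by
  induction t with
  | nil => intro rs prev n; simp [pvRunsAux]
  | cons c t ih =>
    intro rs prev n
    rw [List.foldl_cons]
    by_cases h : c = prev
    · rw [show pvStepRuns (rs ++ [(prev, n)]) c = rs ++ [(prev, n + 1)] by
        simp [pvStepRuns, h]]
      rw [ih rs prev (n + 1)]
      simp [pvRunsAux, h]
    · rw [show pvStepRuns (rs ++ [(prev, n)]) c = (rs ++ [(prev, n)]) ++ [(c, 1)] by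
        simp [pvStepRuns]; intro hc; exact absurd hc.symm h]
      rw [ih (rs ++ [(prev, n)]) c 1]
      simp [pvRunsAux, h]

theorem pvFoldStarts_eq (rs : List (Int × Int)) : ∀ (acc : List Int) (s : Int),
    (rs.foldl pvStepStarts (acc, s)).1 = acc ++ pvScanStarts s rs := by
  induction rs with
  | nil => intro acc s; simp [pvScanStarts]
  | cons kn r ih =>
    intro acc s
    rw [List.foldl_cons, show pvStepStarts (acc, s) kn = (acc ++ [s], s + kn.2) from rfl]
    rw [ih (acc ++ [s]) (s + kn.2)]
    simp [pvScanStarts]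

theorem pvRuns_fst (t : List Int) : ∀ (prev n k : Int),
    (pvRunsAux prev n t).map Prod.fst = prev :: (pvChg prev k t).map Prod.snd := by
  induction t with
  | nil => intro prev n k; simp [pvRunsAux, pvChg]
  | cons c t ih =>
    intro prev n k
    by_cases h : c = prev
    · subst h
      rw [show pvRunsAux c n (c :: t) = pvRunsAux c (n + 1) t by simp [pvRunsAux]]
      rw [show pvChg c k (c :: t) = pvChg c (k + 1) t by simp [pvChg]]
      exact ih c (n + 1) (k + 1)
    · rw [show pvRunsAux prev n (c :: t) = (prev, n) :: pvRunsAux c 1 t by simp [pvRunsAux, h]]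
      rw [show pvChg prev k (c :: t) = (k, c) :: pvChg c (k + 1) t by simp [pvChg, h]]
      simp only [List.map_cons]
      rw [ih c 1 (k + 1)]

theorem pvRuns_starts (t : List Int) : ∀ (prev n s : Int),
    pvScanStarts s (pvRunsAux prev n t) = s :: (pvChg prev (s + n) t).map Prod.fst := by
  induction t with
  | nil => intro prev n s; simp [pvRunsAux, pvChg, pvScanStarts]
  | cons c t ih =>
    intro prev n s
    by_cases h : c = prev
    · subst h
      rw [show pvRunsAux c n (c :: t) = pvRunsAux c (n + 1) t by simp [pvRunsAux]]
      rw [show pvChg c (s + n) (c :: t) = pvChg c (s + n + 1) t by simp [pvChg]]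
      rw [ih c (n + 1) s, show s + (n + 1) = s + n + 1 by ring]
    · rw [show pvRunsAux prev n (c :: t) = (prev, n) :: pvRunsAux c 1 t by simp [pvRunsAux, h]]
      rw [show pvChg prev (s + n) (c :: t) = (s + n, c) :: pvChg c (s + n + 1) t by
        simp [pvChg, h]]
      simp only [pvScanStarts, List.map_cons]
      rw [ih c 1 (s + n)]

-- ===== VERDICT (by name: the statement is the Claim_ definition above) =====
theorem get_class_start_end_times_spec : Claim_equal_get_class_start_end_times := by
  intro result _ hpre
  unfold Spec_get_class_start_end_times
  match result, hpre with
  | h :: t, _ =>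
    have eA : get_class_start_end_times (h :: t)
        = (let st := (PySem.List.enumerate (h :: t) 0).foldl pvStepA (h, [h], [0], [])
           (st.2.1, st.2.2.1, st.2.2.2 ++ [((h :: t).length : Int) - 1])) := by
      unfold get_class_start_end_times
      rw [show PySem.List.pyGet? (h :: t) 0 = some h by
        simp [PySem.List.pyGet?, PySem.List.pyIdx?]]
    rw [eA]
    rw [PySem.List.enumerate_cons, List.foldl_cons]
    rw [show pvStepA (h, [h], [0], []) (0, h) = (h, [h], [0], []) by simp [pvStepA]]
    rw [show (0 : Int) + 1 = 1 by norm_num]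
    rw [pvFoldA_eq t h 1 [h] [0] []]
    have eB : get_class_start_end_times_alt (h :: t)
        = ((pvRunsAux h 1 t).map Prod.fst,
           ((pvRunsAux h 1 t).foldl pvStepStarts ([], 0)).1,
           PySem.List.slice ((pvRunsAux h 1 t).foldl pvStepStarts ([], 0)).1 (some 1) none
             ++ [((h :: t).length : Int) - 1]) := by
      unfold get_class_start_end_times_alt
      rw [List.foldl_cons, show pvStepRuns [] h = [(h, 1)] from rfl,
          show ([(h, 1)] : List (Int × Int)) = [] ++ [(h, 1)] from rfl,
          pvFoldRuns_eq t [] h 1, List.nil_append]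
    rw [eB]
    rw [pvFoldStarts_eq (pvRunsAux h 1 t) [] 0, List.nil_append]
    rw [pvRuns_starts t h 1 0, show (0 : Int) + 1 = 1 by norm_num]
    rw [pvRuns_fst t h 1 1]
    simp [PySem.List.slice_from_one]
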